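-- pv_equiv track=rewrite | github.com/anhbkpro/leetcode | arraystrings/longest_unequal_adjacent_groups_subsequence_i.py | getLongestSubsequence
-- ===== SOURCE A (Python) =====
-- from typing import List
--
-- def getLongestSubsequence(words: List[str], groups: List[int]) -> List[str]:
--     stk = []
--     for i, g in enumerate(groups):
--         if not stk or groups[stk[-1]] != g:
--             stk.append(i)
--     ans = []
--     for i in stk:
--         ans.append(words[i])
--
--     return ans
-- ===== SOURCE B (Python) =====
-- from typing import List
--
-- def getLongestSubsequence(words: List[str], groups: List[int]) -> List[str]:
--     def starts(lo, hi):
--         # run-start indices of groups[lo:hi], by divide and conquer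
--         if hi - lo <= 0:
--             return []
--         if hi - lo == 1:
--             return [lo]
--         mid = (lo + hi) // 2
--         left = starts(lo, mid)
--         right = starts(mid, hi)
--         if groups[mid] == groups[mid - 1]:
--             right = right[1:]
--         return left + right
--     return [words[i] for i in starts(0, len(groups))]
-- ===== Notes on version B (the rewrite author's own statement) =====
-- stated objective: alternative
-- what changed: Replaces A's left-to-right index-stack scan with a divide-and-conquer recursion that computes run-start indices of each half independently and merges them by dropping the right half's first index when the boundary groups are equal, then maps the indices to words.
import Mathlib
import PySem

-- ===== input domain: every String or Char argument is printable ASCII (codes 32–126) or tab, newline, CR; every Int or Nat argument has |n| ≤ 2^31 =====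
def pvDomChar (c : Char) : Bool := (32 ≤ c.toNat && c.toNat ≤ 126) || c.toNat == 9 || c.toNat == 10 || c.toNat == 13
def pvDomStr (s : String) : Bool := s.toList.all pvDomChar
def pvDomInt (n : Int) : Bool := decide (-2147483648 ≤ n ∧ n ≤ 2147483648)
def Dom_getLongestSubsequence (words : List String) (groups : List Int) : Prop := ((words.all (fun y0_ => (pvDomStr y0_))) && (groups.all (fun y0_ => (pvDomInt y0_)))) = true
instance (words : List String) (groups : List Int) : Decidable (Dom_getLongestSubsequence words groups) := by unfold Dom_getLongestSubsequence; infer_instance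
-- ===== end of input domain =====

-- B replaces A's left-to-right index-stack scan by a divide-and-conquer recursion computing the
-- run-start indices of each half and merging them (objective: alternative algorithm, same values).

-- ===== PORT A =====
-- literal transliteration of A: build stk of run-start indices, then map words over it
def getLongestSubsequence (words : List String) (groups : List Int) : List String :=
  let stk : List Int := (PySem.List.enumerate groups 0).foldl
    (fun stk p =>
      if stk = [] ∨ PySem.List.pyGetD groups (PySem.List.pyGetD stk (-1) 0) 0 ≠ p.2
      then stk ++ [p.1] else stk) []
  stk.foldl (fun ans i => ans ++ [PySem.List.pyGetD words i ""]) []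

-- ===== PORT B =====
-- transliteration of Source B's starts(lo, hi): divide and conquer over the index interval
def pvStarts (groups : List Int) (lo hi : Int) : List Int :=
  if hi - lo ≤ 0 then []
  else if hi - lo = 1 then [lo]
  else
    let mid := PySem.Int.floordiv (lo + hi) 2
    let left := pvStarts groups lo mid
    let right := pvStarts groups mid hi
    let right :=
      if PySem.List.pyGetD groups mid 0 = PySem.List.pyGetD groups (mid - 1) 0
      then PySem.List.slice right (some 1) none else right
    left ++ right
termination_by (hi - lo).toNat
decreasing_by
  · rw [PySem.Int.floordiv_eq_ediv_of_pos (by omega : (0:Int) < 2)]; omega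
  · rw [PySem.Int.floordiv_eq_ediv_of_pos (by omega : (0:Int) < 2)]; omega

def getLongestSubsequence_alt (words : List String) (groups : List Int) : List String :=
  (pvStarts groups 0 (groups.length : Int)).map (fun i => PySem.List.pyGetD words i "")

-- ===== PRECONDITION & SPEC =====
-- Pre_ excludes exactly the inputs where Python A raises IndexError: a run-start index
-- of `groups` that is not a valid index of `words`.
def Pre_getLongestSubsequence (words : List String) (groups : List Int) : Prop :=
  ∀ k, k < groups.length → (k = 0 ∨ groups[k]? ≠ groups[k-1]?) → k < words.length
instance (words : List String) (groups : List Int) : Decidable (Pre_getLongestSubsequence words groups) := by unfold Pre_getLongestSubsequence; infer_instance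

def pvWitness_getLongestSubsequence : List String × List Int := (["a", "b"], [1, 2])

def Spec_getLongestSubsequence (words : List String) (groups : List Int) (out : List String) : Prop := out = getLongestSubsequence_alt words groups
instance (words : List String) (groups : List Int) (out : List String) : Decidable (Spec_getLongestSubsequence words groups out) := by unfold Spec_getLongestSubsequence; infer_instance

-- ===== CLAIM (what is proved, stated in full; the proofs are below) =====
def Claim_equal_getLongestSubsequence : Prop := ∀ (words : List String) (groups : List Int), Dom_getLongestSubsequence words groups → Pre_getLongestSubsequence words groups → Spec_getLongestSubsequence words groups (getLongestSubsequence words groups)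

-- ===== LEMMAS AND PROOFS =====

-- j is a run start relative to its true predecessor (proof-only helper)
def pvDiffB (groups : List Int) (j : Nat) : Bool := !(groups.getD j 0 == groups.getD (j - 1) 0)

-- j is a run start of the interval beginning at lo (proof-only helper)
def pvCond (groups : List Int) (lo j : Nat) : Bool := j == lo || pvDiffB groups j

-- run-start indices of an enumerated suffix, given the previous group value (proof-only helper)
def pvRunStartsP (p : Option Int) : List (Int × Int) → List Int
  | [] => []
  | (i, g) :: rest => if some g = p then pvRunStartsP p rest else i :: pvRunStartsP (some g) rest

-- the value at any enumerated index of a suffix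
lemma pvEnumLookup (pre suf : List Int) :
    ∀ q ∈ PySem.List.enumerate suf (pre.length), PySem.List.pyGetD (pre ++ suf) q.1 0 = q.2 := by
  intro q hq
  rw [PySem.List.mem_enumerate_iff] at hq
  obtain ⟨k, hk, rfl⟩ := hq
  have : ((pre.length : Int) + k) = ((pre.length + k : Nat) : Int) := by push_cast; ring
  rw [this, PySem.List.pyGetD_natCast]
  simp [List.getD_eq_getElem?_getD, hk]

lemma pvFoldA (groups : List Int) :
    ∀ (pairs : List (Int × Int)) (stk : List Int) (p : Int),
      stk ≠ [] →
      PySem.List.pyGetD groups (PySem.List.pyGetD stk (-1) 0) 0 = p →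
      (∀ q ∈ pairs, PySem.List.pyGetD groups q.1 0 = q.2) →
      pairs.foldl
        (fun stk q =>
          if stk = [] ∨ PySem.List.pyGetD groups (PySem.List.pyGetD stk (-1) 0) 0 ≠ q.2
          then stk ++ [q.1] else stk) stk
        = stk ++ pvRunStartsP (some p) pairs := by
  intro pairs
  induction pairs with
  | nil => intro stk p _ _ _; simp [pvRunStartsP]
  | cons q rest ih =>
    intro stk p hne hlast hq
    obtain ⟨i, g⟩ := q
    have hgi : PySem.List.pyGetD groups i 0 = g := hq (i, g) (List.mem_cons_self ..)
    by_cases hgp : g = p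
    · subst hgp
      rw [List.foldl_cons, if_neg (by simp [hne, hlast]),
        ih stk g hne hlast (fun q hq' => hq q (List.mem_cons_of_mem _ hq'))]
      simp [pvRunStartsP]
    · rw [List.foldl_cons, if_pos (by right; rw [hlast]; exact fun h => hgp h.symm),
        ih (stk ++ [i]) g (by simp) (by rw [PySem.List.pyGetD_neg_one_append_singleton]; exact hgi)
          (fun q hq' => hq q (List.mem_cons_of_mem _ hq'))]
      simp [pvRunStartsP, hgp]

lemma pvDropCons (groups : List Int) (k : Nat) (g : Int) (t : List Int)
    (h : groups.drop k = g :: t) : groups.getD k 0 = g ∧ groups.drop (k + 1) = t := by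
  constructor
  · have h1 : (groups.drop k)[0]? = some g := by rw [h]; rfl
    rw [List.getElem?_drop, Nat.add_zero] at h1
    simp [List.getD_eq_getElem?_getD, h1]
  · have h2 := congrArg List.tail h
    rw [List.tail_drop] at h2
    simpa using h2

-- run starts of a suffix with the true predecessor value as state = the filter of pvDiffB
lemma pvRunP_main (groups : List Int) :
    ∀ (suf : List Int) (k : Nat) (g : Int), groups.drop k = suf → 1 ≤ k →
      groups.getD (k - 1) 0 = g →
      pvRunStartsP (some g) (PySem.List.enumerate suf (k : Int)) =
        ((List.range' k suf.length).filter (pvDiffB groups)).map Int.ofNat := by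
  intro suf
  induction suf with
  | nil => intro k g _ _ _; simp [PySem.List.enumerate_nil, pvRunStartsP]
  | cons h t ih =>
    intro k g hdrop hk hprev
    obtain ⟨hkh, hdrop'⟩ := pvDropCons groups k h t hdrop
    have hcast : ((k : Int) + 1) = ((k + 1 : Nat) : Int) := by push_cast; ring
    rw [PySem.List.enumerate_cons, List.length_cons, List.range'_succ, List.filter_cons]
    have hdk : pvDiffB groups k = !(h == g) := by simp only [pvDiffB, hkh, hprev]
    have hih := ih (k + 1) h hdrop' (by omega) (by simpa using hkh)
    by_cases hg : h = g
    · subst hg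
      rw [show pvRunStartsP (some h) (((k : Int), h) :: PySem.List.enumerate t ((k:Int) + 1))
            = pvRunStartsP (some h) (PySem.List.enumerate t ((k:Int) + 1)) by
          simp [pvRunStartsP]]
      rw [hdk, hcast, hih]
      simp
    · rw [show pvRunStartsP (some g) (((k : Int), h) :: PySem.List.enumerate t ((k:Int) + 1))
            = (k : Int) :: pvRunStartsP (some h) (PySem.List.enumerate t ((k:Int) + 1)) by
          simp [pvRunStartsP, hg]]
      rw [hdk, hcast, hih]
      simp [hg]

-- A's run starts (state none, from index 0) = the filter of pvCond at lo = 0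
lemma pvRunP_zero (groups : List Int) :
    pvRunStartsP none (PySem.List.enumerate groups 0) =
      ((List.range' 0 groups.length).filter (pvCond groups 0)).map Int.ofNat := by
  cases groups with
  | nil => simp [PySem.List.enumerate_nil, pvRunStartsP]
  | cons h t =>
    rw [PySem.List.enumerate_cons, List.length_cons, List.range'_succ, List.filter_cons]
    simp only [zero_add]
    have h0 : pvCond (h :: t) 0 0 = true := by simp [pvCond]
    rw [h0]
    have hmain := pvRunP_main (h :: t) t 1 h (by simp) (by omega) (by simp)
    have hcongr : (List.range' 1 t.length).filter (pvCond (h :: t) 0)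
        = (List.range' 1 t.length).filter (pvDiffB (h :: t)) := by
      apply List.filter_congr
      intro j hj
      have : 1 ≤ j := (List.mem_range'_1.mp hj).1
      simp [pvCond, Nat.ne_of_gt this]
    rw [hcongr, show pvRunStartsP none ((0, h) :: PySem.List.enumerate t 1)
          = (0 : Int) :: pvRunStartsP (some h) (PySem.List.enumerate t 1) by
        simp [pvRunStartsP]]
    rw [show ((1 : Nat) : Int) = (1 : Int) by norm_num] at hmain
    rw [hmain]
    simp

-- B's divide and conquer = the filter of pvCond over the interval
lemma pvStarts_eq (groups : List Int) :
    ∀ (d lo : Nat), pvStarts groups (lo : Int) ((lo + d : Nat) : Int) =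
      ((List.range' lo d).filter (pvCond groups lo)).map Int.ofNat := by
  intro d
  induction d using Nat.strong_induction_on with
  | _ d ih =>
    intro lo
    match d, ih with
    | 0, _ => rw [pvStarts]; simp
    | 1, _ =>
      rw [pvStarts]
      have : ((lo + 1 : Nat) : Int) - (lo : Int) = 1 := by push_cast; ring
      rw [if_neg (by omega), if_pos this]
      simp [pvCond]
    | (d + 2), ih =>
      set n := d + 2 with hn
      rw [pvStarts]
      rw [if_neg (by push_cast; omega), if_neg (by push_cast; omega)]
      dsimp only
      have hmid : PySem.Int.floordiv ((lo : Int) + ((lo + n : Nat) : Int)) 2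
          = ((lo + n / 2 : Nat) : Int) := by
        have : ((lo : Int) + ((lo + n : Nat) : Int)) = ((2 * lo + n : Nat) : Int) := by
          push_cast; ring
        rw [this, show ((2 : Int)) = ((2 : Nat) : Int) by norm_num,
          PySem.Int.floordiv_natCast]
        congr 1
        omega
      set m := n / 2 with hm
      have hm1 : 1 ≤ m := by omega
      have hmn : m < n := by omega
      rw [hmid]
      have hleft := ih m hmn lo
      have hright := ih (n - m) (by omega) (lo + m)
      rw [show ((lo + m : Nat) + (n - m) : Nat) = (lo + n : Nat) by omega] at hright
      rw [hleft, hright]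
      -- the boundary comparison
      have hsub : ((lo + m : Nat) : Int) - 1 = ((lo + m - 1 : Nat) : Int) := by omega
      rw [hsub, PySem.List.pyGetD_natCast, PySem.List.pyGetD_natCast]
      -- split range' lo n at lo+m
      have hsplit : List.range' lo n = List.range' lo m ++ List.range' (lo + m) (n - m) := by
        have h := (List.range'_append_1 (s := lo) (m := m) (n := n - m)).symm
        rwa [show m + (n - m) = n by omega] at h
      rw [hsplit, List.filter_append, List.map_append]
      congr 1
      -- right part
      have hhead : List.range' (lo + m) (n - m) = (lo + m) :: List.range' (lo + m + 1) (n - m - 1) := by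
        rw [show n - m = (n - m - 1) + 1 by omega, List.range'_succ]
        congr 2
      have ht1 : (List.range' (lo + m + 1) (n - m - 1)).filter (pvCond groups (lo + m))
          = (List.range' (lo + m + 1) (n - m - 1)).filter (pvDiffB groups) := by
        apply List.filter_congr
        intro j hj
        have : lo + m + 1 ≤ j := (List.mem_range'_1.mp hj).1
        have hne : (j == lo + m) = false := by simp; omega
        simp [pvCond, hne]
      have ht2 : (List.range' (lo + m + 1) (n - m - 1)).filter (pvCond groups lo)
          = (List.range' (lo + m + 1) (n - m - 1)).filter (pvDiffB groups) := by
        apply List.filter_congr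
        intro j hj
        have : lo + m + 1 ≤ j := (List.mem_range'_1.mp hj).1
        have hne : (j == lo) = false := by simp; omega
        simp [pvCond, hne]
      rw [hhead, List.filter_cons, List.filter_cons, ht1, ht2]
      have hcm : pvCond groups (lo + m) (lo + m) = true := by simp [pvCond]
      have hcl : pvCond groups lo (lo + m) = pvDiffB groups (lo + m) := by
        have hne : (lo + m == lo) = false := by simp; omega
        simp [pvCond, hne]
      rw [hcm, hcl]
      by_cases hb : groups.getD (lo + m) 0 = groups.getD (lo + m - 1) 0
      · rw [if_pos hb, PySem.List.slice_from_one]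
        have : pvDiffB groups (lo + m) = false := by
          unfold pvDiffB
          rw [beq_iff_eq.mpr hb]
          rfl
        rw [this]
        simp
      · rw [if_neg hb]
        have : pvDiffB groups (lo + m) = true := by
          unfold pvDiffB
          rw [beq_eq_false_iff_ne.mpr hb]
          rfl
        rw [this]

-- ===== VERDICT (by name: the statement is the Claim_ definition above) =====
theorem getLongestSubsequence_spec : Claim_equal_getLongestSubsequence := by
  intro words groups _ _
  unfold Spec_getLongestSubsequence getLongestSubsequence getLongestSubsequence_alt
  have hB : pvStarts groups 0 (groups.length : Int)
      = ((List.range' 0 groups.length).filter (pvCond groups 0)).map Int.ofNat := by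
    have := pvStarts_eq groups groups.length 0
    simpa using this
  cases groups with
  | nil =>
    rw [pvStarts]
    simp [PySem.List.enumerate_nil]
  | cons g rest =>
    rw [PySem.List.enumerate_cons, List.foldl_cons, if_pos (Or.inl rfl)]
    simp only [List.nil_append, zero_add]
    rw [pvFoldA (g :: rest) (PySem.List.enumerate rest 1) [(0 : Int)] g (by simp)
      (by rw [show PySem.List.pyGetD [(0 : Int)] (-1) 0 = 0 by decide]
          exact PySem.List.pyGetD_zero_cons ..)
      (by simpa using pvEnumLookup [g] rest)]
    rw [PySem.List.foldl_append_singleton_eq_map]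
    have h2 : ([(0 : Int)] ++ pvRunStartsP (some g) (PySem.List.enumerate rest 1))
        = pvRunStartsP none (PySem.List.enumerate ((g :: rest) : List Int) 0) := by
      rw [PySem.List.enumerate_cons]
      simp [pvRunStartsP]
    rw [h2, pvRunP_zero, hB]
    simp
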